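-- pv_equiv track=rewrite | github.com/victorkolis/PythonMaster | CODEWARS/7kyu/NUMBER_TO_DIGIT_TIERS/main.py | create_array_of_tiers
-- ===== SOURCE A (Python) =====
-- def create_array_of_tiers(n):
--     n = str(n)
--     m = []
--     for index in range(len(n)):
--         try:
--             m += [str(n)[0:index + 1]]
--         except IndexError:
--             pass
--
--     return m
-- ===== SOURCE B (Python) =====
-- def create_array_of_tiers(n):
--     result = []
--     prefix = ""
--     for ch in str(n):
--         prefix += ch
--         result.append(prefix)
--     return result
-- ===== Notes on version B (the rewrite author's own statement) =====
-- stated objective: idiomatic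
-- what changed: B builds each tier by extending a running prefix one character at a time in a single left-to-right scan, instead of re-slicing the whole string from the start at every loop index as A does.
import Mathlib
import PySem

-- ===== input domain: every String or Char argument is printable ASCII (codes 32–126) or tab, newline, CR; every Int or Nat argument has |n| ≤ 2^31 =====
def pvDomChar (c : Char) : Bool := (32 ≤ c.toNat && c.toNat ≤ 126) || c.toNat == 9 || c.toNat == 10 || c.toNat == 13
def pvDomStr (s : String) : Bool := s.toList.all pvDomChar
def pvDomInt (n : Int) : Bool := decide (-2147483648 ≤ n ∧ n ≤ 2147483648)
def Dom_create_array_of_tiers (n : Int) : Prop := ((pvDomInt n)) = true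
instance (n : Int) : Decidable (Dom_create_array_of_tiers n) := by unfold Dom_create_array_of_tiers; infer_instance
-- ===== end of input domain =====

-- B builds each tier by extending a running prefix one character per step (single scan),
-- instead of A's re-slicing the whole string from the start at every loop index; same cost class.


-- ===== PORT A =====
-- the try/except IndexError in A is dead code: slicing never raises IndexError
def create_array_of_tiers (n : Int) : List String :=
  let s := PySem.Int.toStr n
  (PySem.List.pyRange 0 (PySem.Str.len s) 1).foldl
    (fun m index => m ++ [PySem.Str.slice (PySem.Int.toStr n) (some 0) (some (index + 1))]) []

-- ===== PORT B =====
-- running prefix kept as a List Char (string concatenation = list append)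
def tiersGo (acc : List Char) : List Char → List String
  | [] => []
  | c :: rest => String.ofList (acc ++ [c]) :: tiersGo (acc ++ [c]) rest

def create_array_of_tiers_alt (n : Int) : List String :=
  tiersGo [] (PySem.Int.toChars n)

-- ===== PRECONDITION & SPEC =====
def Spec_create_array_of_tiers (n : Int) (out : List String) : Prop := out = create_array_of_tiers_alt n
instance (n : Int) (out : List String) : Decidable (Spec_create_array_of_tiers n out) := by unfold Spec_create_array_of_tiers; infer_instance

-- ===== CLAIM (what is proved, stated in full; the proofs are below) =====
def Claim_equal_create_array_of_tiers : Prop := ∀ (n : Int), Dom_create_array_of_tiers n → Spec_create_array_of_tiers n (create_array_of_tiers n)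

-- ===== LEMMAS AND PROOFS =====
lemma foldl_append_singleton {α β : Type} (f : α → β) :
    ∀ (l : List α) (init : List β),
      l.foldl (fun m i => m ++ [f i]) init = init ++ l.map f := by
  intro l
  induction l with
  | nil => simp
  | cons x xs ih => intro init; simp [List.foldl, ih]

lemma tiersGo_eq_map (cs : List Char) :
    ∀ (pre : List Char),
      tiersGo pre cs = (List.range cs.length).map (fun k => String.ofList (pre ++ cs.take (k + 1))) := by
  induction cs with
  | nil => intro pre; simp [tiersGo]
  | cons c rest ih =>
      intro pre
      simp only [tiersGo, ih (pre ++ [c]), List.length_cons, List.range_succ_eq_map,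
        List.map_cons, List.map_map]
      congr 1
      apply List.map_congr_left
      intro k _
      simp [List.take_succ_cons, List.append_assoc, Nat.succ_eq_add_one]

theorem create_array_of_tiers_spec : Claim_equal_create_array_of_tiers := by
  intro n _
  unfold Spec_create_array_of_tiers create_array_of_tiers create_array_of_tiers_alt
  rw [foldl_append_singleton]
  rw [tiersGo_eq_map]
  simp only [List.nil_append]
  have hlen : PySem.Str.len (PySem.Int.toStr n) = ((PySem.Int.toChars n).length : Int) := by
    simp [PySem.Str.len_eq, PySem.Int.toList_toStr]
  rw [hlen, PySem.List.pyRange_one, List.map_map]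
  simp only [Int.sub_zero, Int.toNat_natCast]
  apply List.map_congr_left
  intro k _
  have hcast : (0 : Int) + (k : Int) + 1 = ((k + 1 : Nat) : Int) := by push_cast; ring
  simp only [Function.comp, hcast]
  simp only [PySem.Str.slice, PySem.Int.toList_toStr, PySem.Chars.slice_eq_listSlice,
    PySem.List.slice_zero_start, PySem.List.slice_to_natCast]
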